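-- pv_equiv track=rewrite | github.com/MathiyazhaganNTL/odoo_hackathon | challenge.py | custom_fizzbuzz
-- ===== SOURCE A (Python) =====
-- def custom_fizzbuzz(n, rules):
--     """
--     Custom FizzBuzz with configurable rules.
--
--     Args:
--         n (int): The upper limit (inclusive)
--         rules (dict): Dictionary mapping divisors to replacement strings
--
--     Returns:
--         list: List of strings based on custom rules
--
--     Examples:
--         >>> custom_fizzbuzz(10, {2: 'Even', 3: 'Three'})
--         ['1', 'Even', 'Three', 'Even', '5', 'EvenThree', '7', 'Even', 'Three', 'Even']
--     """
--     result = []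
--     for i in range(1, n + 1):
--         output = ""
--         for divisor in sorted(rules.keys()):
--             if i % divisor == 0:
--                 output += rules[divisor]
--         result.append(output if output else str(i))
--     return result
-- ===== SOURCE B (Python) =====
-- def custom_fizzbuzz(n, rules):
--     if n < 1:
--         return []
--     buffers = [[] for _ in range(n)]
--     for d in sorted(rules):
--         rep = rules[d]
--         step = abs(d)
--         for q in range(1, n // step + 1):
--             buffers[q * step - 1].append(rep)
--     return ["".join(b) or str(i + 1) for i, b in enumerate(buffers)]
-- ===== Notes on version B (the rewrite author's own statement) =====
-- stated objective: faster
-- what changed: Instead of testing every divisor against every i (re-sorting the keys on each iteration), B sorts the keys once and, for each divisor, walks only its multiples appending the replacement into per-index buffers, then joins each buffer or falls back to str(i).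
import Mathlib
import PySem

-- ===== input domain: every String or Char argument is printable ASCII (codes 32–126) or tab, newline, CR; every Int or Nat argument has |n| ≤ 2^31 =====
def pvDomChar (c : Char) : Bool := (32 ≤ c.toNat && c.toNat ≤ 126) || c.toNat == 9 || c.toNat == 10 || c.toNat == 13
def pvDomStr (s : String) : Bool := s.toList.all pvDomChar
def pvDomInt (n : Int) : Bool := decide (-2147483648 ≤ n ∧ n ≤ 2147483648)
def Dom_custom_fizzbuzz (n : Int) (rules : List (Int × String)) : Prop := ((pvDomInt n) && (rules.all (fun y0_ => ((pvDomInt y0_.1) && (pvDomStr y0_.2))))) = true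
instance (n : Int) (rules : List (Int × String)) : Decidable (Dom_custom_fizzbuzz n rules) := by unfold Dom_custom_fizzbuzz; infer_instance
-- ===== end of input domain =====

-- B replaces A's per-number scan over the (re-sorted every iteration) divisor list by sorting the
-- keys once and walking each divisor's multiples into per-index buffers (objective: faster).

-- ===== PORT A =====
-- 'rules[divisor]' is ported as getD with "" : the key comes from rules' own key list, so no KeyError.
def custom_fizzbuzz (n : Int) (rules : List (Int × String)) : List String :=
  let d := PySem.Dict.ofList rules
  (PySem.List.pyRange 1 (n + 1) 1).foldl
    (fun result i =>
      let output := (PySem.List.sorted d.keys (fun x => x) false).foldl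
        (fun output divisor =>
          if PySem.Int.mod i divisor == 0 then output ++ d.getD divisor "" else output) ""
      result ++ [if output ≠ "" then output else PySem.Int.toStr i]) []

-- ===== PORT B =====
-- 'abs(d)' is ported as (dv.natAbs : Int); 'buffers[i].append(rep)' as set/getD on the buffer list.
def custom_fizzbuzz_alt (n : Int) (rules : List (Int × String)) : List String :=
  if n < 1 then []
  else
    let d := PySem.Dict.ofList rules
    let buffers0 : List (List String) := List.replicate n.toNat []
    let buffers := (PySem.List.sorted d.keys (fun x => x) false).foldl
      (fun bs dv =>
        let rep := d.getD dv ""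
        let step : Int := (dv.natAbs : Int)
        (PySem.List.pyRange 1 (PySem.Int.floordiv n step + 1) 1).foldl
          (fun bs q =>
            bs.set (q * step - 1).toNat (bs.getD (q * step - 1).toNat [] ++ [rep])) bs)
      buffers0
    (PySem.List.enumerate buffers 0).map
      (fun p =>
        let out := PySem.Str.join "" p.2
        if out ≠ "" then out else PySem.Int.toStr (p.1 + 1))

-- ===== PRECONDITION & SPEC =====
-- Pre_ excludes exactly the inputs on which A raises ZeroDivisionError (i % 0): n ≥ 1 with 0 a key
-- of rules (B's range(1, n // 0 + 1) raises there too); it excludes no input on which A returns.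
def Pre_custom_fizzbuzz (n : Int) (rules : List (Int × String)) : Prop :=
  1 ≤ n → ∀ p ∈ rules, p.1 ≠ (0 : Int)
instance (n : Int) (rules : List (Int × String)) : Decidable (Pre_custom_fizzbuzz n rules) := by
  unfold Pre_custom_fizzbuzz; infer_instance

def pvWitness_custom_fizzbuzz : Int × (List (Int × String)) := (5, [(2, "Even"), (3, "Three")])

def Spec_custom_fizzbuzz (n : Int) (rules : List (Int × String)) (out : List String) : Prop := out = custom_fizzbuzz_alt n rules
instance (n : Int) (rules : List (Int × String)) (out : List String) : Decidable (Spec_custom_fizzbuzz n rules out) := by unfold Spec_custom_fizzbuzz; infer_instance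

-- ===== CLAIM (what is proved, stated in full; the proofs are below) =====
def Claim_equal_custom_fizzbuzz : Prop := ∀ (n : Int) (rules : List (Int × String)), Dom_custom_fizzbuzz n rules → Pre_custom_fizzbuzz n rules → Spec_custom_fizzbuzz n rules (custom_fizzbuzz n rules)

-- ===== LEMMAS AND PROOFS =====

-- Proof-only names for B's two loop bodies (definitionally the lambdas in custom_fizzbuzz_alt).
def multStep (s : Int) (r : String) (bs : List (List String)) (q : Int) : List (List String) :=
  bs.set (q * s - 1).toNat (bs.getD (q * s - 1).toNat [] ++ [r])

def divStep (n : Int) (rep : Int → String) (bs : List (List String)) (dv : Int) : List (List String) :=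
  (PySem.List.pyRange 1 (PySem.Int.floordiv n ((dv.natAbs : Int)) + 1) 1).foldl
    (multStep ((dv.natAbs : Int)) (rep dv)) bs

-- "".join(x :: rest) peels off its head.
lemma join_empty_cons (x : String) (rest : List String) :
    PySem.Str.join "" (x :: rest) = x ++ PySem.Str.join "" rest := by
  cases rest with
  | nil => simp [PySem.Str.join, PySem.Chars.join_singleton, PySem.Chars.join_nil]
  | cons y t =>
      simp [PySem.Str.join, PySem.Chars.join_cons_cons]

-- A's inner string accumulation is "".join of the replacements of the divisors that pass the test.
lemma strfold (rep : Int → String) (p : Int → Bool) :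
    ∀ (ks : List Int) (acc : String),
      ks.foldl (fun o dv => if p dv then o ++ rep dv else o) acc
        = acc ++ PySem.Str.join "" ((ks.filter p).map rep) := by
  intro ks
  induction ks with
  | nil => intro acc; simp [PySem.Str.join, PySem.Chars.join_nil]
  | cons dv t ih =>
      intro acc
      by_cases h : p dv = true
      · simp only [List.foldl_cons, h, if_pos, List.filter_cons_of_pos h, List.map_cons,
          join_empty_cons, ih, String.append_assoc]
      · simp only [List.foldl_cons, h, if_neg, Bool.false_eq_true, not_false_iff,
          List.filter_cons_of_neg, ih]

-- After Q passes of B's multiples loop, buffer j has gained [r] iff j+1 is a multiple of s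
-- not exceeding Q*s.
lemma multiples_foldl (s : Int) (hs : 0 < s) (r : String) :
    ∀ (Q : Nat) (bs : List (List String)), (Q : Int) * s ≤ (bs.length : Int) →
      (((List.range Q).foldl (fun bs (k : Nat) => multStep s r bs (1 + (k : Int))) bs).length = bs.length
       ∧ ∀ j : Nat, j < bs.length →
          ((List.range Q).foldl (fun bs (k : Nat) => multStep s r bs (1 + (k : Int))) bs).getD j []
            = bs.getD j []
              ++ (if s ∣ ((j : Int) + 1) ∧ ((j : Int) + 1) ≤ (Q : Int) * s then [r] else [])) := by
  have hset : ∀ (l : List (List String)) (i j : Nat) (a : List String),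
      (l.set i a).getD j ([] : List String) = if i = j ∧ j < l.length then a else l.getD j [] := by
    intro l i j a
    simp [List.getD_eq_getElem?_getD, List.getElem?_set]
    split_ifs <;> simp_all
  intro Q
  induction Q with
  | zero => intro bs _; exact ⟨rfl, by intro j hj; simp⟩
  | succ Q ih =>
      intro bs hQ
      have hcast : ((Q + 1 : Nat) : Int) * s = (Q : Int) * s + s := by push_cast; ring
      rw [hcast] at hQ
      have hQ' : (Q : Int) * s ≤ (bs.length : Int) := by nlinarith
      obtain ⟨hl, hv⟩ := ih bs hQ'
      have hidxnn : (0 : Int) ≤ (1 + (Q : Int)) * s - 1 := by nlinarith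
      have hidxval : ((((1 + (Q : Int)) * s - 1).toNat : Nat) : Int) = (1 + (Q : Int)) * s - 1 :=
        Int.toNat_of_nonneg hidxnn
      have hidxlt : ((1 + (Q : Int)) * s - 1).toNat < bs.length := by
        have : (1 + (Q : Int)) * s - 1 < (bs.length : Int) := by nlinarith
        omega
      rw [List.range_succ, List.foldl_append, List.foldl_cons, List.foldl_nil]
      set prev := (List.range Q).foldl (fun bs (k : Nat) => multStep s r bs (1 + (k : Int))) bs with hprev
      constructor
      · simp only [multStep, List.length_set]; exact hl
      · intro j hj
        have hjlt : j < prev.length := by rw [hl]; exact hj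
        simp only [multStep, hset prev _ j, hl]
        by_cases hje : ((1 + (Q : Int)) * s - 1).toNat = j
        · -- the newly touched index: (j:Int) + 1 = (Q+1)*s
          have hj1 : ((j : Int)) + 1 = (1 + (Q : Int)) * s := by omega
          rw [if_pos ⟨hje, hj⟩, ← hje, hv _ hidxlt, hje]
          have hnot : ¬ (s ∣ ((j : Int) + 1) ∧ ((j : Int) + 1) ≤ (Q : Int) * s) := by
            rintro ⟨-, hle⟩; nlinarith
          have hyes : s ∣ ((j : Int) + 1) ∧ ((j : Int) + 1) ≤ ((Q + 1 : Nat) : Int) * s := by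
            refine ⟨⟨1 + (Q : Int), by linarith [hj1]⟩, by rw [hcast]; nlinarith⟩
          rw [if_neg hnot, if_pos hyes]
          simp
        · rw [if_neg (by tauto), hv j hj]
          congr 1
          have hne : ((j : Int)) + 1 ≠ (1 + (Q : Int)) * s := by omega
          by_cases hdvd : s ∣ ((j : Int) + 1)
          · obtain ⟨t, ht⟩ := hdvd
            have hiff : (((j : Int)) + 1 ≤ (Q : Int) * s) ↔ (((j : Int)) + 1 ≤ ((Q + 1 : Nat) : Int) * s) := by
              rw [hcast]
              constructor
              · intro h; linarith
              · intro h
                have hlt2 : s * t < s * ((Q : Int) + 1) := by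
                  have h1 : s * t ≤ s * ((Q : Int) + 1) := by nlinarith
                  have h2 : s * t ≠ s * ((Q : Int) + 1) := by
                    intro hc; apply hne; rw [ht, hc]; ring
                  exact lt_of_le_of_ne h1 h2
                have htlt : t ≤ (Q : Int) := by
                  have := lt_of_mul_lt_mul_left hlt2 (le_of_lt hs); omega
                have hmul : s * t ≤ s * (Q : Int) := mul_le_mul_of_nonneg_left htlt (le_of_lt hs)
                nlinarith
            by_cases hle : ((j : Int)) + 1 ≤ (Q : Int) * s
            · rw [if_pos ⟨⟨t, ht⟩, hle⟩, if_pos ⟨⟨t, ht⟩, hiff.mp hle⟩]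
            · rw [if_neg (by tauto), if_neg (by rw [← hiff] at *; tauto)]
          · rw [if_neg (by tauto), if_neg (by tauto)]

-- One divisor dv ≠ 0 of B's outer loop appends rep to exactly the buffers of its multiples.
lemma divisor_step (n : Int) (hn : 1 ≤ n) (rep : Int → String) (dv : Int) (hdv : dv ≠ 0)
    (bs : List (List String)) (hb : (bs.length : Int) = n) :
    (divStep n rep bs dv).length = bs.length
     ∧ ∀ j : Nat, j < bs.length →
        (divStep n rep bs dv).getD j []
          = bs.getD j [] ++ (if dv ∣ ((j : Int) + 1) then [rep dv] else []) := by
  have hs : (0 : Int) < (dv.natAbs : Int) := by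
    have h0 : dv.natAbs ≠ 0 := Int.natAbs_ne_zero.mpr hdv
    exact_mod_cast Nat.pos_of_ne_zero h0
  have hF0 : 0 ≤ PySem.Int.floordiv n (dv.natAbs : Int) :=
    (PySem.Int.le_floordiv_iff_mul_le hs).mpr (by omega)
  have hFle : PySem.Int.floordiv n (dv.natAbs : Int) * (dv.natAbs : Int) ≤ n := by
    have h1 := PySem.Int.floordiv_mul_add_mod n (dv.natAbs : Int)
    have h2 := PySem.Int.mod_nonneg n hs
    omega
  have hrange : PySem.List.pyRange 1 (PySem.Int.floordiv n (dv.natAbs : Int) + 1) 1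
      = (List.range ((PySem.Int.floordiv n (dv.natAbs : Int)).toNat)).map (fun (k : Nat) => 1 + (k : Int)) := by
    rw [PySem.List.pyRange_one]
    congr 2
    omega
  have hcast : (((PySem.Int.floordiv n (dv.natAbs : Int)).toNat : Nat) : Int)
      = PySem.Int.floordiv n (dv.natAbs : Int) := Int.toNat_of_nonneg hF0
  obtain ⟨hl, hv⟩ := multiples_foldl (dv.natAbs : Int) hs (rep dv)
    (PySem.Int.floordiv n (dv.natAbs : Int)).toNat bs (by rw [hcast, hb]; exact hFle)
  constructor
  · simpa only [divStep, hrange, List.foldl_map] using hl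
  · intro j hj
    have hval := hv j hj
    have hcond : ((dv.natAbs : Int) ∣ ((j : Int) + 1)
        ∧ ((j : Int) + 1) ≤ (((PySem.Int.floordiv n (dv.natAbs : Int)).toNat : Nat) : Int) * (dv.natAbs : Int))
        ↔ dv ∣ ((j : Int) + 1) := by
      rw [hcast]
      constructor
      · rintro ⟨h1, -⟩
        exact Int.natAbs_dvd.mp h1
      · intro h1
        have h2 : (dv.natAbs : Int) ∣ ((j : Int) + 1) := Int.natAbs_dvd.mpr h1
        refine ⟨h2, ?_⟩
        obtain ⟨t, ht⟩ := h2
        have hjn : (j : Int) + 1 ≤ n := by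
          rw [← hb]; omega
        have ht1 : t ≤ PySem.Int.floordiv n (dv.natAbs : Int) :=
          (PySem.Int.le_floordiv_iff_mul_le hs).mpr (by nlinarith)
        nlinarith [mul_le_mul_of_nonneg_right ht1 (le_of_lt hs)]
    rw [if_congr hcond rfl rfl] at hval
    simpa only [divStep, hrange, List.foldl_map] using hval

-- B's whole outer loop: buffer j collects, in key order, the replacements of the divisors of j+1.
lemma outer_foldl (n : Int) (hn : 1 ≤ n) (rep : Int → String) :
    ∀ (ks : List Int), (∀ dv ∈ ks, dv ≠ 0) →
      ∀ (bs : List (List String)), (bs.length : Int) = n →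
        (ks.foldl (divStep n rep) bs).length = bs.length
         ∧ ∀ j : Nat, j < bs.length →
            (ks.foldl (divStep n rep) bs).getD j []
              = bs.getD j []
                ++ ((ks.filter (fun dv => decide (dv ∣ ((j : Int) + 1)))).map rep) := by
  intro ks
  induction ks with
  | nil => intro _ bs hb; simp
  | cons dv t ih =>
      intro hks bs hb
      obtain ⟨hl, hv⟩ := divisor_step n hn rep dv (hks dv (by simp)) bs hb
      obtain ⟨hl', hv'⟩ := ih (fun x hx => hks x (by simp [hx])) (divStep n rep bs dv)
        (by rw [hl]; exact hb)
      constructor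
      · simpa [hl] using hl'
      · intro j hj
        have hj' : j < (divStep n rep bs dv).length := by rw [hl]; exact hj
        simp only [List.foldl_cons, hv' j hj', hv j hj, List.filter_cons]
        by_cases h : dv ∣ ((j : Int) + 1) <;> simp [h, List.append_assoc]

-- keys of a dict built from an association list come from the list's first components.
lemma mem_keys_update_sub {κ ν : Type} [BEq κ] [LawfulBEq κ] (ps : List (κ × ν)) :
    ∀ (d : PySem.Dict κ ν) (k : κ), k ∈ (d.update ps).keys → k ∈ d.keys ∨ k ∈ ps.map Prod.fst := by
  induction ps with
  | nil => intro d k h; exact Or.inl h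
  | cons p t ih =>
      intro d k h
      rcases ih (d.insert p.1 p.2) k h with h' | h'
      · rcases (PySem.Dict.mem_keys_insert d p.1 k p.2).mp h' with h'' | h''
        · exact Or.inr (by simp [h''])
        · exact Or.inl h''
      · exact Or.inr (by simp [h'])

lemma mem_keys_ofList_sub {κ ν : Type} [BEq κ] [LawfulBEq κ] (ps : List (κ × ν)) (k : κ)
    (h : k ∈ (PySem.Dict.ofList ps).keys) : k ∈ ps.map Prod.fst := by
  rcases mem_keys_update_sub ps PySem.Dict.empty k h with h' | h'
  · simp [PySem.Dict.keys_empty] at h'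
  · exact h'

-- ===== VERDICT (by name: the statement is the Claim_ definition above) =====
-- '%' is divisibility: the Bool test A runs equals the decidable divisibility proposition.
lemma modBeq (i dv : Int) : (PySem.Int.mod i dv == 0) = decide (dv ∣ i) := by
  rw [Bool.eq_iff_iff]
  simp [PySem.Int.mod_eq_zero_iff_dvd]

-- A's whole loop, with the inner fold already expressed as a join over the divisor filter.
lemma Aside (d : PySem.Dict Int String) (ks : List Int) :
    ∀ (l : List Int) (acc : List String),
      l.foldl (fun result i =>
        let output := ks.foldl (fun output divisor =>
          if PySem.Int.mod i divisor == 0 then output ++ d.getD divisor "" else output) ""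
        result ++ [if output ≠ "" then output else PySem.Int.toStr i]) acc
      = acc ++ l.map (fun i =>
          let output := PySem.Str.join ""
            ((ks.filter (fun dv => decide (dv ∣ i))).map (fun dv => d.getD dv ""))
          if output ≠ "" then output else PySem.Int.toStr i) := by
  intro l
  induction l with
  | nil => intro acc; simp
  | cons i t ih =>
      intro acc
      simp only [List.foldl_cons, List.map_cons, ih]
      have h1 : ks.foldl (fun output divisor =>
            if PySem.Int.mod i divisor == 0 then output ++ d.getD divisor "" else output) ""
          = PySem.Str.join ""
              ((ks.filter (fun dv => decide (dv ∣ i))).map (fun dv => d.getD dv "")) := by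
        rw [strfold (fun dv => d.getD dv "") (fun dv => PySem.Int.mod i dv == 0) ks ""]
        rw [List.filter_congr (fun dv _ => modBeq i dv)]
        simp
      rw [h1, List.append_assoc]
      rfl

theorem custom_fizzbuzz_spec : Claim_equal_custom_fizzbuzz := by
  intro n rules _ hpre
  unfold Spec_custom_fizzbuzz
  by_cases hn : n < 1
  · have h1 : PySem.List.pyRange 1 (n + 1) 1 = [] := PySem.List.pyRange_one_eq_nil (by omega)
    simp [custom_fizzbuzz, custom_fizzbuzz_alt, h1, hn]
  · have hn1 : 1 ≤ n := by omega
    clear hn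
    have hn := hn1
    have hn' : ¬ n < 1 := by omega
    have hpre' := hpre hn
    have hks0 : ∀ dv ∈ PySem.List.sorted (PySem.Dict.ofList rules).keys (fun x => x) false,
        dv ≠ (0 : Int) := by
      intro dv hm
      have h1 : dv ∈ (PySem.Dict.ofList rules).keys := (PySem.List.mem_sorted _ _ _ dv).mp hm
      have h2 : dv ∈ rules.map Prod.fst := mem_keys_ofList_sub rules dv h1
      obtain ⟨p, hp, hp2⟩ := List.mem_map.mp h2
      exact hp2 ▸ hpre' p hp
    have hA : custom_fizzbuzz n rules
        = (PySem.List.pyRange 1 (n + 1) 1).map (fun i =>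
            let output := PySem.Str.join ""
              (((PySem.List.sorted (PySem.Dict.ofList rules).keys (fun x => x) false).filter
                  (fun dv => decide (dv ∣ i))).map
                (fun dv => (PySem.Dict.ofList rules).getD dv ""))
            if output ≠ "" then output else PySem.Int.toStr i) := by
      simp only [custom_fizzbuzz]
      rw [Aside]
      simp
    have hB : custom_fizzbuzz_alt n rules
        = (PySem.List.enumerate
            ((PySem.List.sorted (PySem.Dict.ofList rules).keys (fun x => x) false).foldl
              (divStep n (fun dv => (PySem.Dict.ofList rules).getD dv ""))
              (List.replicate n.toNat [])) 0).map
            (fun p =>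
              let out := PySem.Str.join "" p.2
              if out ≠ "" then out else PySem.Int.toStr (p.1 + 1)) := by
      simp only [custom_fizzbuzz_alt]
      rw [if_neg hn']
      rfl
    obtain ⟨hlB, hvB⟩ := outer_foldl n hn (fun dv => (PySem.Dict.ofList rules).getD dv "")
      (PySem.List.sorted (PySem.Dict.ofList rules).keys (fun x => x) false) hks0
      (List.replicate n.toNat []) (by simp; omega)
    rw [hA, hB]
    rw [PySem.List.enumerate_eq_map_pyRange _ ([] : List String)]
    have hlenB : ((PySem.List.sorted (PySem.Dict.ofList rules).keys (fun x => x) false).foldl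
        (divStep n (fun dv => (PySem.Dict.ofList rules).getD dv ""))
        (List.replicate n.toNat [])).length = n.toNat := by simpa using hlB
    have hlen' : PySem.List.len
        ((PySem.List.sorted (PySem.Dict.ofList rules).keys (fun x => x) false).foldl
          (divStep n (fun dv => (PySem.Dict.ofList rules).getD dv ""))
          (List.replicate n.toNat [])) = (n.toNat : Int) := by
      simp [PySem.List.len, hlenB]
    rw [hlen']
    rw [PySem.List.pyRange_one 0, PySem.List.pyRange_one 1]
    have he1 : ((n.toNat : Int) - 0).toNat = n.toNat := by omega
    have he2 : (n + 1 - 1).toNat = n.toNat := by omega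
    rw [he1, he2]
    simp only [List.map_map]
    apply List.map_congr_left
    intro k hk
    have hk' : k < n.toNat := List.mem_range.mp hk
    simp only [Function.comp_apply, zero_add]
    rw [PySem.List.pyGetD_of_nonneg _ _ (Int.natCast_nonneg k), Int.toNat_natCast]
    have hkrep : k < (List.replicate n.toNat ([] : List String)).length := by simpa using hk'
    rw [hvB k hkrep]
    have hrepl : (List.replicate n.toNat ([] : List String)).getD k [] = [] := by
      simp [List.getD_eq_getElem?_getD]
    rw [hrepl]
    have hax : (1 : Int) + (k : Int) = (k : Int) + 1 := by ring
    simp only [hax, List.nil_append]
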